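-- pv_equiv track=rewrite | github.com/HerbertFeng/Herbert-Feng-GitHub | Competition/USACO/USACO 2023 December Contest, Bronze Test/3.Farmer_John_Actually_Farms.py | check_is_infinity
-- ===== SOURCE A (Python) =====
-- def check_is_infinity(heights=[], growths=[]):
--     # heights=[4,4,4],growths=[8,8,6]  => True
--     # heights=[4,5,4],growths=[8,8,6]  => False
--     n = len(growths)
--     growths_key_index_dict = {}
--     for i in range(n):
--         if growths[i] not in growths_key_index_dict:
--             growths_key_index_dict[growths[i]] = []
--         growths_key_index_dict[growths[i]].append(i)
--
--     # detect the duplicate growth and init_height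
--     if len(growths_key_index_dict) != n:
--         for k, v in growths_key_index_dict.items():
--             if len(v) >= 1:
--                 if len(set([heights[idx] for idx in v])) != len(v):
--                     return True
--     return False
-- ===== SOURCE B (Python) =====
-- def check_is_infinity(heights=[], growths=[]):
--     # Single streaming pass: no duplicate growth => False immediately;
--     # otherwise return True as soon as a (growth, height) pair repeats.
--     if len(set(growths)) == len(growths):
--         return False
--     seen = set()
--     for i in range(len(growths)):
--         p = (growths[i], heights[i])
--         if p in seen:
--             return True
--         seen.add(p)
--     return False
-- ===== Notes on version B (the rewrite author's own statement) =====
-- stated objective: simpler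
-- what changed: Replaces the dict-of-index-lists plus grouped second pass over materialized height groups with a single streaming pass that keeps one set of (growth, height) pairs, after an immediate False when all growths are distinct.
-- outside the precondition, e.g. on check_is_infinity([4, 4], [8, 8, 5]): A returns True, B returns True
import Mathlib
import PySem

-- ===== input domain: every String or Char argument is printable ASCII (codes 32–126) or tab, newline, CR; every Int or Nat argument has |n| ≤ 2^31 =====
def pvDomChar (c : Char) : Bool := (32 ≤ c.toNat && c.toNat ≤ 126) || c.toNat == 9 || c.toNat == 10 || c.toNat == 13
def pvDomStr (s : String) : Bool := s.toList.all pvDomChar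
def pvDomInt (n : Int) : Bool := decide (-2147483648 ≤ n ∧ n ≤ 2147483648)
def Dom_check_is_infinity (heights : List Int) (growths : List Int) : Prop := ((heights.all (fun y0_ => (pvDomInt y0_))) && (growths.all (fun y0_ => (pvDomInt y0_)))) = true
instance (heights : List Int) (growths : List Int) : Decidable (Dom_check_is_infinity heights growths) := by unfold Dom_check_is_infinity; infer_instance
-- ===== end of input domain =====

-- B replaces A's dict-of-index-lists and grouped second pass by a single streaming
-- pass over a set of (growth, height) pairs (simpler, same asymptotic cost).


-- ===== PORT A =====
def check_is_infinity (heights : List Int) (growths : List Int) : Bool :=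
  let n : Int := growths.length
  let d : PySem.Dict Int (List Int) :=
    (PySem.List.pyRange 0 n 1).foldl
      (fun d i =>
        let g := PySem.List.pyGetD growths i 0
        let d := if d.contains g then d else d.insert g []
        d.modify g [] (fun v => v ++ [i]))
      PySem.Dict.empty
  if (d.size : Int) ≠ n then
    -- 'for k, v in items: if …: return True' ported as List.any over the items
    d.items.any (fun kv =>
      decide (1 ≤ kv.2.length) &&
      decide ((PySem.Set.ofList (kv.2.map (fun idx => PySem.List.pyGetD heights idx 0))).length ≠ kv.2.length))
  else false

-- ===== PORT B =====
-- the streaming 'for i in range(len(growths))' loop of Source B, with its early return True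
def pvAltLoop (heights : List Int) (growths : List Int) : List Int → PySem.Set (Int × Int) → Bool
  | [], _ => false
  | i :: rest, seen =>
    let p : Int × Int := (PySem.List.pyGetD growths i 0, PySem.List.pyGetD heights i 0)
    if PySem.Set.contains seen p then true
    else pvAltLoop heights growths rest (PySem.Set.add seen p)

def check_is_infinity_alt (heights : List Int) (growths : List Int) : Bool :=
  if (PySem.Set.ofList growths).length = growths.length then false
  else pvAltLoop heights growths (PySem.List.pyRange 0 growths.length 1) PySem.Set.empty

-- ===== PRECONDITION & SPEC =====
-- Pre_ excludes inputs where heights is shorter than growths and some growth repeats: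
-- there the Python A either raises IndexError materializing a height group, or (on a few
-- such inputs) still returns True after finding a duplicate pair before the bad index.
def Pre_check_is_infinity (heights : List Int) (growths : List Int) : Prop :=
  growths.Nodup ∨ growths.length ≤ heights.length
instance (heights : List Int) (growths : List Int) : Decidable (Pre_check_is_infinity heights growths) := by unfold Pre_check_is_infinity; infer_instance

def pvWitness_check_is_infinity : List Int × List Int := ([4, 4, 4], [8, 8, 6])

def Spec_check_is_infinity (heights : List Int) (growths : List Int) (out : Bool) : Prop := out = check_is_infinity_alt heights growths
instance (heights : List Int) (growths : List Int) (out : Bool) : Decidable (Spec_check_is_infinity heights growths out) := by unfold Spec_check_is_infinity; infer_instance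

-- ===== CLAIM (what is proved, stated in full; the proofs are below) =====
def Claim_equal_check_is_infinity : Prop := ∀ (heights : List Int) (growths : List Int), Dom_check_is_infinity heights growths → Pre_check_is_infinity heights growths → Spec_check_is_infinity heights growths (check_is_infinity heights growths)

-- ===== LEMMAS AND PROOFS =====

theorem pv_discard_of_not_mem {α : Type} [BEq α] [LawfulBEq α] (s : PySem.Set α) (x : α)
    (h : x ∉ s) : PySem.Set.discard s x = s := by
  simp [PySem.Set.discard]
  intro y hy; exact fun e => h (e ▸ hy)

-- set(xs) has as many elements as xs iff xs has no duplicates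
theorem pv_ofList_length_iff {α : Type} [BEq α] [LawfulBEq α] (xs : List α) :
    (PySem.Set.ofList xs).length = xs.length ↔ xs.Nodup := by
  induction xs with
  | nil => simp [PySem.Set.ofList_nil]
  | cons x xs ih =>
    rw [PySem.Set.ofList_cons]
    by_cases hx : x ∈ xs
    · have hx' : x ∈ PySem.Set.ofList xs := (PySem.Set.mem_ofList xs x).2 hx
      have h1 : (PySem.Set.discard (PySem.Set.ofList xs) x).length < (PySem.Set.ofList xs).length := by
        simp only [PySem.Set.discard]
        exact List.length_filter_lt_length_iff_exists.2 ⟨x, hx', by simp⟩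
      have h2 := PySem.Set.length_ofList_le xs
      simp only [List.length_cons, List.nodup_cons]
      constructor
      · intro h; omega
      · intro h; exact absurd hx h.1
    · rw [pv_discard_of_not_mem _ _ (by simpa using (fun h => hx ((PySem.Set.mem_ofList xs x).1 h)))]
      simp [List.nodup_cons, hx, ih]

-- A's conditional-insert-then-append body is exactly a Dict.modify
theorem pv_body_eq_modify (d : PySem.Dict Int (List Int)) (g : Int) (f : List Int → List Int) :
    (if d.contains g then d else d.insert g []).modify g [] f = d.modify g [] f := by
  by_cases h : d.contains g
  · simp [h]
  · simp only [h, if_false, Bool.false_eq_true]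
    simp only [PySem.Dict.modify]
    rw [PySem.Dict.getD_insert_self, PySem.Dict.insert_insert_self,
        PySem.Dict.getD_of_not_contains (h := by simpa using h)]

-- characterization of B's streaming loop: it returns false iff no pair repeats
theorem pv_altLoop_char (heights growths : List Int) (idxs : List Int)
    (seen : PySem.Set (Int × Int)) (hs : seen.Nodup) :
    pvAltLoop heights growths idxs seen = false ↔
      (seen ++ idxs.map (fun i => (PySem.List.pyGetD growths i 0, PySem.List.pyGetD heights i 0))).Nodup := by
  induction idxs generalizing seen with
  | nil => simpa [pvAltLoop] using hs
  | cons i rest ih =>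
    simp only [pvAltLoop, List.map_cons]
    by_cases hp : PySem.Set.contains seen (PySem.List.pyGetD growths i 0, PySem.List.pyGetD heights i 0)
    · have hmem := (PySem.Set.contains_iff _ _).1 hp
      simp only [hp, if_true]
      constructor
      · intro h; cases h
      · intro h
        exact absurd ((List.nodup_append.1 h).2.2 _ hmem _ (List.mem_cons_self) rfl) (by simp)
    · have hnm : (PySem.List.pyGetD growths i 0, PySem.List.pyGetD heights i 0) ∉ seen := by
        intro hm; exact hp ((PySem.Set.contains_iff _ _).2 hm)
      have hadd : PySem.Set.add seen (PySem.List.pyGetD growths i 0, PySem.List.pyGetD heights i 0)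
          = seen ++ [(PySem.List.pyGetD growths i 0, PySem.List.pyGetD heights i 0)] := by
        simp only [PySem.Set.add]
        rw [if_neg (by simpa using hp)]
      simp only [hp, if_false, Bool.false_eq_true]
      rw [ih _ (by
        rw [hadd, List.nodup_append]
        exact ⟨hs, List.nodup_singleton _, by
          intro a ha b hb; simp at hb; intro e; exact hnm (by rw [← e] at hb; exact hb ▸ ha)⟩)]
      rw [hadd, List.append_assoc, List.singleton_append]

-- the index-grouping fold, reshaped as a fold over (key, index) pairs
theorem pv_fold_eq (growths : List Int) (l : List Int) :
    (l.foldl (fun d i => d.modify (PySem.List.pyGetD growths i 0) [] (fun v => v ++ [i]))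
      (PySem.Dict.empty : PySem.Dict Int (List Int)))
    = ((l.map (fun i => (PySem.List.pyGetD growths i 0, i))).foldl
        (fun d p => d.modify p.1 [] (fun v => v ++ [p.2])) PySem.Dict.empty) := by
  rw [List.foldl_map]

theorem pv_fold_keys (growths : List Int) :
    ((PySem.List.pyRange 0 (growths.length : Int) 1).foldl
      (fun d i => d.modify (PySem.List.pyGetD growths i 0) [] (fun v => v ++ [i]))
      (PySem.Dict.empty : PySem.Dict Int (List Int))).keys = PySem.Set.ofList growths := by
  rw [PySem.Dict.keys_foldl_modify_key _ _ _ (fun _ i => fun v => v ++ [i]) _]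
  rw [PySem.Dict.keys_empty, PySem.Set.update_nil_left, PySem.List.map_pyGetD_pyRange_zero']

theorem pv_fold_getD (growths : List Int) (k : Int) :
    ((PySem.List.pyRange 0 (growths.length : Int) 1).foldl
      (fun d i => d.modify (PySem.List.pyGetD growths i 0) [] (fun v => v ++ [i]))
      (PySem.Dict.empty : PySem.Dict Int (List Int))).getD k []
    = (PySem.List.pyRange 0 (growths.length : Int) 1).filter
        (fun i => PySem.List.pyGetD growths i 0 == k) := by
  rw [pv_fold_eq, PySem.Dict.getD_foldl_modify_append]
  simp [List.filter_map, List.map_map, Function.comp_def]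

-- the per-group duplicate test, with the trivial 'len(v) >= 1' absorbed
theorem pv_cond_iff (v : List Int) (hf : Int → Int) :
    (1 ≤ v.length ∧ ¬((v.map hf).Nodup)) ↔ ¬((v.map hf).Nodup) := by
  constructor
  · exact fun h => h.2
  · intro h
    refine ⟨?_, h⟩
    cases v with
    | nil => exact absurd (by simp) h
    | cons a t => simp

-- characterization of A: true iff some growth repeats and some growth group repeats a height
theorem pv_A_char (heights growths : List Int) :
    check_is_infinity heights growths = true ↔
      ¬growths.Nodup ∧ ∃ k ∈ PySem.Set.ofList growths,
        ¬(((PySem.List.pyRange 0 (growths.length : Int) 1).filter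
            (fun i => PySem.List.pyGetD growths i 0 == k)).map
          (fun i => PySem.List.pyGetD heights i 0)).Nodup := by
  unfold check_is_infinity
  simp only [pv_body_eq_modify]
  have hkeys := pv_fold_keys growths
  have hnodk : ((PySem.List.pyRange 0 (growths.length : Int) 1).foldl
      (fun d i => d.modify (PySem.List.pyGetD growths i 0) [] (fun v => v ++ [i]))
      (PySem.Dict.empty : PySem.Dict Int (List Int))).keys.Nodup := by
    rw [hkeys]; exact PySem.Set.nodup_ofList _
  have hsz : (((PySem.List.pyRange 0 (growths.length : Int) 1).foldl
      (fun d i => d.modify (PySem.List.pyGetD growths i 0) [] (fun v => v ++ [i]))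
      (PySem.Dict.empty : PySem.Dict Int (List Int))).size : Int) = ((PySem.Set.ofList growths).length : Int) := by
    simp only [PySem.Dict.size, PySem.Dict.keys] at hkeys ⊢
    rw [← hkeys]; simp
  rw [PySem.Dict.items_eq_map_keys _ hnodk [], hkeys, hsz, List.any_map]
  split_ifs with hc
  · have hnd : ¬growths.Nodup := by
      intro hn; exact hc (by exact_mod_cast (pv_ofList_length_iff growths).2 hn)
    simp only [hnd, not_false_iff, true_and]
    rw [List.any_eq_true]
    constructor
    · rintro ⟨k, hk, hcond⟩
      refine ⟨k, hk, ?_⟩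
      simp only [Function.comp_apply, Bool.and_eq_true, decide_eq_true_eq] at hcond
      have := ((pv_cond_iff _ _).1 ⟨hcond.1, by
        intro hnodup
        exact hcond.2 (by
          rw [pv_fold_getD] at hnodup ⊢
          rw [(pv_ofList_length_iff _).2 hnodup, List.length_map])⟩)
      rwa [pv_fold_getD] at this
    · rintro ⟨k, hk, hcond⟩
      refine ⟨k, hk, ?_⟩
      simp only [Function.comp_apply, Bool.and_eq_true, decide_eq_true_eq]
      rw [pv_fold_getD]
      have h1 := (pv_cond_iff ((PySem.List.pyRange 0 (growths.length : Int) 1).filter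
            (fun i => PySem.List.pyGetD growths i 0 == k)) (fun i => PySem.List.pyGetD heights i 0)).2 hcond
      refine ⟨h1.1, ?_⟩
      intro hlen
      exact hcond ((pv_ofList_length_iff _).1 (by rwa [List.length_map]))
  · have hnd : growths.Nodup := by
      by_contra hn
      exact hc (by
        intro he
        exact hn ((pv_ofList_length_iff growths).1 (by exact_mod_cast he)))
    simp [hnd]

-- characterization of B
theorem pv_B_char (heights growths : List Int) :
    check_is_infinity_alt heights growths = true ↔
      ¬growths.Nodup ∧ ¬((PySem.List.pyRange 0 (growths.length : Int) 1).map
          (fun i => (PySem.List.pyGetD growths i 0, PySem.List.pyGetD heights i 0))).Nodup := by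
  unfold check_is_infinity_alt
  split_ifs with h
  · simp [(pv_ofList_length_iff growths).1 h]
  · have hnd : ¬growths.Nodup := fun hn => h ((pv_ofList_length_iff growths).2 hn)
    have hchar := pv_altLoop_char heights growths (PySem.List.pyRange 0 growths.length 1)
        PySem.Set.empty (List.nodup_nil)
    simp only [hnd, not_false_iff, true_and]
    constructor
    · intro ht hnodup
      rw [hchar.2 hnodup] at ht; cases ht
    · intro hn
      cases hloop : pvAltLoop heights growths (PySem.List.pyRange 0 growths.length 1) PySem.Set.empty with
      | true => rfl
      | false => exact absurd (hchar.1 hloop) hn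

-- the crux: some growth group repeats a height iff some (growth, height) pair repeats
theorem pv_crux (l : List Int) (hl : l.Nodup) (kf hf : Int → Int) :
    (∃ k ∈ l.map kf, ¬((l.filter (fun i => kf i == k)).map hf).Nodup) ↔
      ¬(l.map (fun i => (kf i, hf i))).Nodup := by
  constructor
  · rintro ⟨k, -, hk⟩ hnd
    apply hk
    have hfil : (l.filter (fun i => kf i == k)).Nodup := hl.filter _
    rw [List.nodup_map_iff_inj_on hfil]
    intro x hx y hy hxy
    have hinj := (List.nodup_map_iff_inj_on hl).1 hnd
    have hx' := List.of_mem_filter hx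
    have hy' := List.of_mem_filter hy
    simp only [beq_iff_eq] at hx' hy'
    exact hinj x (List.mem_of_mem_filter hx) y (List.mem_of_mem_filter hy)
      (by rw [Prod.mk.injEq]; exact ⟨hx'.trans hy'.symm, hxy⟩)
  · intro hnd
    rw [List.nodup_map_iff_inj_on hl] at hnd
    push Not at hnd
    obtain ⟨x, hx, y, hy, hpr, hxy⟩ := hnd
    have hk1 : kf x = kf y := congrArg Prod.fst hpr
    have hk2 : hf x = hf y := congrArg Prod.snd hpr
    refine ⟨kf x, List.mem_map_of_mem hx, ?_⟩
    intro hnd2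
    have hfil : (l.filter (fun i => kf i == kf x)).Nodup := hl.filter _
    exact hxy ((List.nodup_map_iff_inj_on hfil).1 hnd2 x
      (List.mem_filter.2 ⟨hx, by simp⟩) y (List.mem_filter.2 ⟨hy, by simp [hk1]⟩) hk2)

-- ===== VERDICT (by name: the statement is the Claim_ definition above) =====
theorem check_is_infinity_spec : Claim_equal_check_is_infinity := by
  intro heights growths _ _
  unfold Spec_check_is_infinity
  rw [Bool.eq_iff_iff, pv_A_char, pv_B_char]
  refine and_congr_right fun _ => ?_
  have h := pv_crux (PySem.List.pyRange 0 (growths.length : Int) 1)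
    (PySem.List.nodup_pyRange_one _ _)
    (fun i => PySem.List.pyGetD growths i 0) (fun i => PySem.List.pyGetD heights i 0)
  rw [PySem.List.map_pyGetD_pyRange_zero'] at h
  rw [← h]
  refine exists_congr fun k => and_congr_left fun _ => ?_
  rw [PySem.Set.mem_ofList]
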